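-- pv_equiv track=rewrite | github.com/mapogalmagi/Coding-Test-Practice | 프로그래머스/2/389479. 서버 증설 횟수/서버 증설 횟수.py | solution
-- ===== SOURCE A (Python) =====
-- def solution(players, m, k):
--     answer = 0
--     server_list = []
--     cnt = 0 # 현재 서버 수
--
--     for idx, num in enumerate(players):
--         # 감당 안 될때
--         if num // m > cnt:
--             mid = num // m - cnt # 증설된 서버 수
--             cnt += mid
--             answer += mid
--             # 시작 위치, 지속 시간, 지금 서버 수
--             server_list.append([idx,k, mid])
--
--         # 기본 경우
--         if server_list:
--             # 시간이 경과함에 따라 감소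
--             for li in server_list:
--                 li[1] -= 1
--
--         for li in server_list:
--             if li[1] == 0:
--                 cnt -= li[2]
--
--     return answer
-- ===== SOURCE B (Python) =====
-- def solution(players, m, k):
--     answer = 0
--     cnt = 0
--     expire = {}  # time index -> number of servers whose rental ends at that index
--     for idx, num in enumerate(players):
--         cnt -= expire.get(idx, 0)
--         need = num // m
--         if need > cnt:
--             answer += need - cnt
--             expire[idx + k] = need - cnt
--             cnt = need
--     return answer
-- ===== Notes on version B (the rewrite author's own statement) =====
-- stated objective: faster
-- what changed: Replaces A's list of live servers that is rescanned and timer-decremented at every time step by a dictionary mapping each future time index to the number of servers expiring there, so cnt is updated by one O(1) lookup per step instead of two inner scans.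
import Mathlib
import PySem

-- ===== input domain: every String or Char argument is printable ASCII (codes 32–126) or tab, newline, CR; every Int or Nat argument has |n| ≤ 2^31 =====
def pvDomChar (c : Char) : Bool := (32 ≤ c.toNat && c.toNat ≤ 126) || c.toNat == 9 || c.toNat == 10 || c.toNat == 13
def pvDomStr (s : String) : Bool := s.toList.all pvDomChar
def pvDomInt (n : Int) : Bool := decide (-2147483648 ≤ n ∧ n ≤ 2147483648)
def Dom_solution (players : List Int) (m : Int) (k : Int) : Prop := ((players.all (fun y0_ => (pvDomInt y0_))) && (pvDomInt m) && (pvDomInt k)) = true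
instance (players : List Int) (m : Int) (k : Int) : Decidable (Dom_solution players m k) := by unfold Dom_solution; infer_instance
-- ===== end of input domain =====

-- B replaces A's per-step rescan of the live-server list by a dictionary of
-- expiry times, updating cnt with one lookup per step (objective: faster).

-- ===== PORT A =====
-- one iteration of A's loop body; state = (answer, server_list, cnt), p = (idx, num)
def stepA (m k : Int) (st : Int × List (Int × Int × Int) × Int) (p : Int × Int) :
    Int × List (Int × Int × Int) × Int :=
  let st1 :=
    if PySem.Int.floordiv p.2 m > st.2.2 then
      let mid := PySem.Int.floordiv p.2 m - st.2.2
      (st.1 + mid, st.2.1 ++ [(p.1, k, mid)], st.2.2 + mid)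
    else st
  let sl := if st1.2.1 ≠ [] then st1.2.1.map (fun li => (li.1, li.2.1 - 1, li.2.2)) else st1.2.1
  let cnt := sl.foldl (fun c li => if li.2.1 = 0 then c - li.2.2 else c) st1.2.2
  (st1.1, sl, cnt)

def solution (players : List Int) (m : Int) (k : Int) : Int :=
  ((PySem.List.enumerate players 0).foldl (stepA m k) (0, [], 0)).1

-- ===== PORT B =====
-- one iteration of B's loop body; state = (answer, cnt, expire), p = (idx, num)
def stepB (m k : Int) (st : Int × Int × PySem.Dict Int Int) (p : Int × Int) :
    Int × Int × PySem.Dict Int Int :=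
  let cnt := st.2.1 - st.2.2.getD p.1 0
  let need := PySem.Int.floordiv p.2 m
  if need > cnt then
    (st.1 + (need - cnt), need, st.2.2.insert (p.1 + k) (need - cnt))
  else
    (st.1, cnt, st.2.2)

def solution_alt (players : List Int) (m : Int) (k : Int) : Int :=
  ((PySem.List.enumerate players 0).foldl (stepB m k) (0, 0, PySem.Dict.empty)).1

-- ===== PRECONDITION & SPEC =====
-- Python raises ZeroDivisionError on 'num // m' when m = 0 and there is at least one player.
def Pre_solution (players : List Int) (m : Int) (k : Int) : Prop := players = [] ∨ m ≠ 0
instance (players : List Int) (m : Int) (k : Int) : Decidable (Pre_solution players m k) := by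
  unfold Pre_solution; infer_instance
def pvWitness_solution : List Int × Int × Int := ([10, 6, 2, 0, 5], 3, 2)

def Spec_solution (players : List Int) (m : Int) (k : Int) (out : Int) : Prop := out = solution_alt players m k
instance (players : List Int) (m : Int) (k : Int) (out : Int) : Decidable (Spec_solution players m k out) := by unfold Spec_solution; infer_instance

-- ===== CLAIM (what is proved, stated in full; the proofs are below) =====
def Claim_equal_solution : Prop := ∀ (players : List Int) (m : Int) (k : Int), Dom_solution players m k → Pre_solution players m k → Spec_solution players m k (solution players m k)

-- ===== LEMMAS AND PROOFS =====

-- sum of the server sizes in A's list whose timer equals d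
def sumT : List (Int × Int × Int) → Int → Int
  | [], _ => 0
  | li :: sl, d => (if li.2.1 = d then li.2.2 else 0) + sumT sl d

theorem sumT_append (sl : List (Int × Int × Int)) (e : Int × Int × Int) (d : Int) :
    sumT (sl ++ [e]) d = sumT sl d + (if e.2.1 = d then e.2.2 else 0) := by
  induction sl with
  | nil => simp [sumT]
  | cons li sl ih => simp [sumT, ih]; ring

theorem sumT_map_dec (sl : List (Int × Int × Int)) (d : Int) :
    sumT (sl.map (fun li => (li.1, li.2.1 - 1, li.2.2))) d = sumT sl (d + 1) := by
  induction sl with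
  | nil => simp [sumT]
  | cons li sl ih =>
    simp [sumT, ih]
    congr 1
    by_cases h : li.2.1 = d + 1 <;> simp [h, sub_eq_iff_eq_add]

theorem foldl_expire (sl : List (Int × Int × Int)) (c0 : Int) :
    sl.foldl (fun c li => if li.2.1 = 0 then c - li.2.2 else c) c0 = c0 - sumT sl 0 := by
  induction sl generalizing c0 with
  | nil => simp [sumT]
  | cons li sl ih =>
    simp only [List.foldl, sumT, ih]
    by_cases h : li.2.1 = 0 <;> simp [h]
    ring

theorem sumT_eq_zero (sl : List (Int × Int × Int)) (d : Int)
    (h : ∀ li ∈ sl, li.2.1 ≠ d) : sumT sl d = 0 := by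
  induction sl with
  | nil => rfl
  | cons li sl ih =>
    simp [sumT, h li (by simp)]
    exact ih (fun x hx => h x (by simp [hx]))

-- the coupling invariant between A's state and B's state after t iterations
def InvAB (k t : Int) (a : Int × List (Int × Int × Int) × Int) (b : Int × Int × PySem.Dict Int Int) : Prop :=
  a.1 = b.1 ∧
  a.2.2 = b.2.1 - b.2.2.getD t 0 ∧
  (∀ j : Int, t ≤ j → b.2.2.getD j 0 = sumT a.2.1 (j - t)) ∧
  (∀ li ∈ a.2.1, li.2.1 < k)

theorem sumT_eq_zero_of_lt (sl : List (Int × Int × Int)) (k d : Int)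
    (h4 : ∀ li ∈ sl, li.2.1 < k) (hd : k ≤ d) : sumT sl d = 0 :=
  sumT_eq_zero sl d (fun li hli => by have := h4 li hli; omega)

theorem Inv_step (m k t x : Int) (a : Int × List (Int × Int × Int) × Int)
    (b : Int × Int × PySem.Dict Int Int) (h : InvAB k t a b) :
    InvAB k (t + 1) (stepA m k a (t, x)) (stepB m k b (t, x)) := by
  obtain ⟨h1, h2, h3, h4⟩ := h
  obtain ⟨ansA, sl, cntA⟩ := a
  obtain ⟨ansB, cntB, exp⟩ := b
  simp only at h1 h2 h3 h4
  subst h1 h2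
  by_cases hf : PySem.Int.floordiv x m > cntB - exp.getD t 0
  · -- the expansion branch fires in both programs
    -- key : the dictionary after insertion still tabulates the timer sums
    have key : ∀ j : Int, t + 1 ≤ j →
        (exp.insert (t + k) (PySem.Int.floordiv x m - (cntB - exp.getD t 0))).getD j 0
          = sumT ((sl ++ [(t, k, PySem.Int.floordiv x m - (cntB - exp.getD t 0))]).map
              (fun li => (li.1, li.2.1 - 1, li.2.2))) (j - (t + 1)) := by
      intro j hj
      rw [sumT_map_dec, show j - (t + 1) + 1 = j - t by ring, sumT_append,
        PySem.Dict.getD_insert]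
      by_cases hk : j = t + k
      · rw [if_pos hk, sumT_eq_zero_of_lt sl k (j - t) h4 (by omega),
          if_pos (show (k : Int) = j - t by omega)]
        ring
      · rw [if_neg hk, h3 j (by omega), if_neg (show ¬ (k : Int) = j - t by omega)]
        ring
    have hsl : (sl ++ [(t, k, PySem.Int.floordiv x m - (cntB - exp.getD t 0))]) ≠ [] := by
      simp
    simp only [stepA, stepB, InvAB, if_pos hf, if_pos hsl, ne_eq, foldl_expire]
    refine ⟨trivial, ?_, key, ?_⟩
    · rw [key (t + 1) (by omega), show t + 1 - (t + 1) = (0 : Int) by ring]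
      ring
    · intro li hli
      rcases List.mem_map.mp hli with ⟨e, he, rfl⟩
      rcases List.mem_append.mp he with he' | he'
      · have := h4 e he'; dsimp; omega
      · simp at he'; obtain ⟨-, h2, -⟩ := he'; dsimp; omega
  · -- no expansion in either program
    have hmap : (if sl ≠ [] then sl.map (fun li => (li.1, li.2.1 - 1, li.2.2)) else sl)
        = sl.map (fun li => (li.1, li.2.1 - 1, li.2.2)) := by
      by_cases hnil : sl = [] <;> simp [hnil]
    simp only [stepA, stepB, InvAB, if_neg hf, hmap, foldl_expire]
    refine ⟨trivial, ?_, ?_, ?_⟩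
    · rw [sumT_map_dec, show (0 : Int) + 1 = t + 1 - t by ring, ← h3 (t + 1) (by omega)]
    · intro j hj
      rw [sumT_map_dec, show j - (t + 1) + 1 = j - t by ring, h3 j (by omega)]
    · intro li hli
      rcases List.mem_map.mp hli with ⟨e, he, rfl⟩
      have := h4 e he; dsimp; omega

theorem main_lemma (m k : Int) (ps : List Int) :
    ∀ (t : Int) (a : Int × List (Int × Int × Int) × Int)
      (b : Int × Int × PySem.Dict Int Int), InvAB k t a b →
    ((PySem.List.enumerate ps t).foldl (stepA m k) a).1
      = ((PySem.List.enumerate ps t).foldl (stepB m k) b).1 := by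
  induction ps with
  | nil => intro t a b h; simpa [PySem.List.enumerate_nil] using h.1
  | cons x ps ih =>
    intro t a b h
    rw [PySem.List.enumerate_cons]
    simp only [List.foldl]
    exact ih (t + 1) _ _ (Inv_step m k t x a b h)

-- ===== VERDICT (by name: the statement is the Claim_ definition above) =====
theorem solution_spec : Claim_equal_solution := by
  intro players m k _ _
  unfold Spec_solution solution solution_alt
  exact main_lemma m k players 0 (0, [], 0) (0, 0, PySem.Dict.empty)
    ⟨rfl, by simp [PySem.Dict.getD_empty], fun j _ => by simp [PySem.Dict.getD_empty, sumT],
     fun li h => by simp at h⟩
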